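-- pv_equiv track=rewrite | github.com/abarnaavenkatesan97/Competetive-coding-problem-solving | beautypair.py | beautifulPairs
-- ===== SOURCE A (Python) =====
-- def beautifulPairs(A, B):
--     count = 0
--     for i in range(len(B)):
--         for j in range(len(A)):
--             if A[j] == B[i]:
--                 A = A[0:j] + A[j+1: ]
--                 count += 1
--                 break
--     if count == len(B):
--         return count - 1
--     else:
--         count += 1
--         return count
-- ===== SOURCE B (Python) =====
-- def beautifulPairs(A, B):
--     freq = {}
--     for x in A:
--         freq[x] = freq.get(x, 0) + 1
--     count = 0
--     for b in B:
--         c = freq.get(b, 0)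
--         if c > 0:
--             freq[b] = c - 1
--             count += 1
--     if count == len(B):
--         return count - 1
--     return count + 1
-- ===== Notes on version B (the rewrite author's own statement) =====
-- stated objective: faster
-- what changed: Replaces the per-element inner scan and repeated list slicing/rebuilding with a frequency dictionary built once over A and decremented while scanning B, then the same +-1 fixup.
import Mathlib
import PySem

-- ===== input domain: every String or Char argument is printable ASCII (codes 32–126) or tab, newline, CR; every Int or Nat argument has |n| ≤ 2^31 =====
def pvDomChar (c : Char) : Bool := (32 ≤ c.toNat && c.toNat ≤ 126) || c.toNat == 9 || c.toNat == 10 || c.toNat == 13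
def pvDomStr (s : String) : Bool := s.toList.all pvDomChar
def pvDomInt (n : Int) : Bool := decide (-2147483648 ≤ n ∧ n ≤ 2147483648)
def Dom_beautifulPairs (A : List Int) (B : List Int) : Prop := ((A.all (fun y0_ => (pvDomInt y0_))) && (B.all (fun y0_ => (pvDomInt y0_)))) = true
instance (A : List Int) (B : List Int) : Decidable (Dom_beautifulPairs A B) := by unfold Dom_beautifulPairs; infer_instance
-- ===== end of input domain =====

-- B replaces A's quadratic inner scan with slicing by a frequency dictionary built once (objective: faster).

-- ===== PORT A =====
-- inner 'for j in range(len(A)): if A[j]==B[i]: A = A[0:j]+A[j+1:]; count += 1; break'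
def bpInner (A : List Int) (b : Int) (j : Nat) (count : Int) : List Int × Int :=
  if h : j < A.length then
    if A[j] = b then
      (PySem.List.slice A (some 0) (some (j : Int)) ++
       PySem.List.slice A (some ((j : Int) + 1)) none, count + 1)
    else bpInner A b (j + 1) count
  else (A, count)
termination_by A.length - j

def beautifulPairs (A : List Int) (B : List Int) : Int :=
  let st := B.foldl (fun (s : List Int × Int) b => bpInner s.1 b 0 s.2) (A, 0)
  if st.2 = (B.length : Int) then st.2 - 1 else st.2 + 1

-- ===== PORT B =====
def beautifulPairs_alt (A : List Int) (B : List Int) : Int :=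
  let freq := A.foldl (fun d x => d.insert x (d.getD x 0 + 1)) PySem.Dict.empty
  let st := B.foldl
    (fun (s : PySem.Dict Int Int × Int) b =>
      let c := s.1.getD b 0
      if c > 0 then (s.1.insert b (c - 1), s.2 + 1) else s) (freq, 0)
  if st.2 = (B.length : Int) then st.2 - 1 else st.2 + 1

-- ===== PRECONDITION & SPEC =====
def Spec_beautifulPairs (A : List Int) (B : List Int) (out : Int) : Prop := out = beautifulPairs_alt A B
instance (A : List Int) (B : List Int) (out : Int) : Decidable (Spec_beautifulPairs A B out) := by unfold Spec_beautifulPairs; infer_instance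

-- ===== CLAIM (what is proved, stated in full; the proofs are below) =====
def Claim_equal_beautifulPairs : Prop := ∀ (A : List Int) (B : List Int), Dom_beautifulPairs A B → Spec_beautifulPairs A B (beautifulPairs A B)

-- ===== LEMMAS AND PROOFS =====

-- A's inner loop removes the first occurrence of b (if any) and bumps the counter.
theorem bpInner_eq (A : List Int) (b : Int) (j : Nat) (c : Int) :
    bpInner A b j c =
      if b ∈ A.drop j then (A.take j ++ (A.drop j).erase b, c + 1) else (A, c) := by
  induction j using bpInner.induct A b with
  | case1 j h heq =>
    have hd : A.drop j = A[j] :: A.drop (j + 1) := List.drop_eq_getElem_cons h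
    rw [bpInner]
    simp only [h, heq, dif_pos, if_pos]
    rw [if_pos (by rw [hd, heq]; exact List.mem_cons_self)]
    have h1 : PySem.List.slice A (some (0 : Int)) (some (j : Int)) = A.take j := by
      simp [PySem.List.slice_to_natCast]
    have h2 : PySem.List.slice A (some ((j : Int) + 1)) none = A.drop (j + 1) := by
      have : ((j : Int) + 1) = ((j + 1 : Nat) : Int) := by push_cast; ring
      rw [this, PySem.List.slice_from_natCast]
    rw [h1, h2, hd, heq]
    simp [List.erase_cons_head]
  | case2 j h heq ih =>
    have hd : A.drop j = A[j] :: A.drop (j + 1) := List.drop_eq_getElem_cons h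
    rw [bpInner]
    simp only [h, heq, dif_pos, if_false]
    rw [ih, hd]
    by_cases hm : b ∈ A.drop (j + 1)
    · rw [if_pos hm, if_pos (List.mem_cons_of_mem _ hm)]
      have he : (A[j] :: A.drop (j + 1)).erase b = A[j] :: (A.drop (j + 1)).erase b :=
        List.erase_cons_tail (by simp [heq])
      have ht : A.take (j + 1) = A.take j ++ [A[j]] := by
        rw [List.take_add_one]; simp [List.getElem?_eq_getElem h]
      rw [he, ht, List.append_assoc, List.singleton_append]
    · have hnm : b ∉ A[j] :: A.drop (j + 1) := by
        simp only [List.mem_cons, not_or]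
        exact ⟨fun e => heq e.symm, hm⟩
      rw [if_neg hm, if_neg hnm]
  | case3 j h =>
    rw [bpInner]
    simp only [h, dif_neg, not_false_iff]
    rw [if_neg (by simp [List.drop_eq_nil_of_le (by omega : A.length ≤ j)])]

-- state invariant: the dict holds exactly the counts of the remaining list
theorem fold_agree (B : List Int) : ∀ (A : List Int) (d : PySem.Dict Int Int) (c : Int),
    (∀ v, d.getD v 0 = (A.count v : Int)) →
    (B.foldl (fun (s : List Int × Int) b => bpInner s.1 b 0 s.2) (A, c)).2 =
    (B.foldl (fun (s : PySem.Dict Int Int × Int) b =>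
        let cb := s.1.getD b 0
        if cb > 0 then (s.1.insert b (cb - 1), s.2 + 1) else s) (d, c)).2 := by
  induction B with
  | nil => intro A d c _; rfl
  | cons b B ih =>
    intro A d c hinv
    simp only [List.foldl_cons]
    rw [bpInner_eq]
    simp only [List.drop_zero, List.take_zero, List.nil_append]
    have hc : d.getD b 0 = (A.count b : Int) := hinv b
    by_cases hm : b ∈ A
    · have hpos : d.getD b 0 > 0 := by
        rw [hc]; exact_mod_cast List.count_pos_iff.mpr hm
      rw [if_pos hm]
      simp only [if_pos hpos]
      apply ih
      intro v
      rw [PySem.Dict.getD_insert]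
      by_cases hv : v = b
      · subst hv
        rw [if_pos rfl, hc, List.count_erase_self]
        have : 1 ≤ A.count v := List.count_pos_iff.mpr hm
        push_cast [this]; ring
      · rw [if_neg hv, List.count_erase_of_ne hv, hinv v]
    · have hz : ¬ d.getD b 0 > 0 := by
        rw [hc]; simp [List.count_eq_zero_of_not_mem hm]
      rw [if_neg hm]
      simp only [if_neg hz]
      exact ih A d c hinv

-- ===== VERDICT (by name: the statement is the Claim_ definition above) =====
theorem beautifulPairs_spec : Claim_equal_beautifulPairs := by
  intro A B _
  unfold Spec_beautifulPairs beautifulPairs beautifulPairs_alt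
  have h := fold_agree B A (A.foldl (fun d x => d.insert x (d.getD x 0 + 1)) PySem.Dict.empty) 0
    (by intro v; simp [PySem.Dict.getD_foldl_insert_add_one])
  simp only [h]
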